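-- pv_equiv track=rewrite | github.com/qqplot/SearchFireSafety | retrieval_eval.py | expand_with_links
-- ===== SOURCE A (Python) =====
-- from typing import List, Dict, Tuple
--
-- def expand_with_links(
--     retrieved_ids: List[int],
--     link_dict: Dict[int, List[int]],
--     topk: int
-- ) -> List[int]:
--     seen = set()
--     expanded: List[int] = []
--     for did in retrieved_ids:
--         if len(expanded) >= topk:
--             break
--         if did not in seen:
--             expanded.append(did)
--             seen.add(did)
--         for linked in link_dict.get(did, []):
--             if len(expanded) >= topk:
--                 break
--             if linked not in seen:
--                 expanded.append(linked)
--                 seen.add(linked)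
--     return expanded
-- ===== SOURCE B (Python) =====
-- def expand_with_links(retrieved_ids, link_dict, topk):
--     flat = []
--     for did in retrieved_ids:
--         flat.append(did)
--         flat.extend(link_dict.get(did, []))
--     return list(dict.fromkeys(flat))[:max(topk, 0)]
-- ===== Notes on version B (the rewrite author's own statement) =====
-- stated objective: simpler
-- what changed: Replaces A's nested loops with a seen-set and double early-exit by a three-stage pipeline: flatten ids with their links, order-preserving dedup via dict.fromkeys, then a single non-negative slice for truncation.
import Mathlib
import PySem

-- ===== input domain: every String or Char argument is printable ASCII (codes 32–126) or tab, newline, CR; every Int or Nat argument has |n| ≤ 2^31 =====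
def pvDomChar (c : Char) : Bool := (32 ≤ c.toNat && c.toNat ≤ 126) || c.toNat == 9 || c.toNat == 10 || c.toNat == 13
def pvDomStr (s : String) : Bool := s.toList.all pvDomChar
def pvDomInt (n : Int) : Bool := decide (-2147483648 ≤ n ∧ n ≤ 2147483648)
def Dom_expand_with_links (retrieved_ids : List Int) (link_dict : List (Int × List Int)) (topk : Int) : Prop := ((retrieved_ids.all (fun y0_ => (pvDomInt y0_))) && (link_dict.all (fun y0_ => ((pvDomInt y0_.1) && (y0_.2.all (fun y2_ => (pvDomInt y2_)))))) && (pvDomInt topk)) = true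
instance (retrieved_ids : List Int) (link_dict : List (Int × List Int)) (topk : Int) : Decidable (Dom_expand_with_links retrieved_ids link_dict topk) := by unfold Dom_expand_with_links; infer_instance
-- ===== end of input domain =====

-- B replaces A's nested loops + seen-set + double early-exit by a flatten → dedup → slice
-- pipeline (objective: simpler decomposition, same cost).

-- ===== PORT A =====
-- inner 'for linked in link_dict.get(did, [])' loop, with its 'break' on len(expanded) >= topk
def pvInnerLoop (links : List Int) (topk : Int) (seen : PySem.Set Int) (expanded : List Int) :
    PySem.Set Int × List Int :=
  match links with
  | [] => (seen, expanded)
  | linked :: rest =>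
    if (expanded.length : Int) ≥ topk then (seen, expanded)   -- break
    else if PySem.Set.contains seen linked then pvInnerLoop rest topk seen expanded
    else pvInnerLoop rest topk (PySem.Set.add seen linked) (expanded ++ [linked])

-- outer 'for did in retrieved_ids' loop, with its 'break'
def pvOuterLoop (ids : List Int) (link_dict : List (Int × List Int)) (topk : Int)
    (seen : PySem.Set Int) (expanded : List Int) : PySem.Set Int × List Int :=
  match ids with
  | [] => (seen, expanded)
  | did :: rest =>
    if (expanded.length : Int) ≥ topk then (seen, expanded)   -- break
    else
      let st1 := if PySem.Set.contains seen did then (seen, expanded)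
                 else (PySem.Set.add seen did, expanded ++ [did])
      let st2 := pvInnerLoop ((PySem.Dict.mk link_dict).getD did []) topk st1.1 st1.2
      pvOuterLoop rest link_dict topk st2.1 st2.2

def expand_with_links (retrieved_ids : List Int) (link_dict : List (Int × List Int)) (topk : Int) : List Int :=
  (pvOuterLoop retrieved_ids link_dict topk PySem.Set.empty []).2

-- ===== PORT B =====
def expand_with_links_alt (retrieved_ids : List Int) (link_dict : List (Int × List Int)) (topk : Int) : List Int :=
  -- flat: append did, then extend with link_dict.get(did, [])
  let flat := retrieved_ids.foldl
    (fun acc did => acc ++ [did] ++ (PySem.Dict.mk link_dict).getD did []) []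
  -- list(dict.fromkeys(flat))[:max(topk, 0)]
  PySem.List.slice (PySem.List.dedup flat) none (some (max topk 0))

-- ===== PRECONDITION & SPEC =====
def Spec_expand_with_links (retrieved_ids : List Int) (link_dict : List (Int × List Int)) (topk : Int) (out : List Int) : Prop := out = expand_with_links_alt retrieved_ids link_dict topk
instance (retrieved_ids : List Int) (link_dict : List (Int × List Int)) (topk : Int) (out : List Int) : Decidable (Spec_expand_with_links retrieved_ids link_dict topk out) := by unfold Spec_expand_with_links; infer_instance

-- ===== CLAIM (what is proved, stated in full; the proofs are below) =====
def Claim_equal_expand_with_links : Prop := ∀ (retrieved_ids : List Int) (link_dict : List (Int × List Int)) (topk : Int), Dom_expand_with_links retrieved_ids link_dict topk → Spec_expand_with_links retrieved_ids link_dict topk (expand_with_links retrieved_ids link_dict topk)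

-- ===== LEMMAS AND PROOFS =====

-- "process xs one element at a time; add each unseen element while there is budget" —
-- the common reference computation both loop structures are reduced to.
def pvAddAll (xs : List Int) (topk : Int) (seen : PySem.Set Int) (expanded : List Int) :
    PySem.Set Int × List Int :=
  match xs with
  | [] => (seen, expanded)
  | x :: rest =>
    if (expanded.length : Int) ≥ topk then pvAddAll rest topk seen expanded
    else if PySem.Set.contains seen x then pvAddAll rest topk seen expanded
    else pvAddAll rest topk (PySem.Set.add seen x) (expanded ++ [x])

-- first-new-occurrence subsequence of xs relative to a seen list
def pvDNew (seen xs : List Int) : List Int :=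
  match xs with
  | [] => []
  | x :: rest => if x ∈ seen then pvDNew seen rest else x :: pvDNew (x :: seen) rest

theorem pvDNew_congr (s₁ s₂ xs : List Int) (h : ∀ y, y ∈ s₁ ↔ y ∈ s₂) :
    pvDNew s₁ xs = pvDNew s₂ xs := by
  induction xs generalizing s₁ s₂ with
  | nil => rfl
  | cons x rest ih =>
    simp only [pvDNew]
    by_cases hx : x ∈ s₁
    · rw [if_pos hx, if_pos ((h x).mp hx)]; exact ih _ _ h
    · rw [if_neg hx, if_neg (fun h2 => hx ((h x).mpr h2))]
      congr 1
      exact ih _ _ (fun y => by simp [h y])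

theorem pvAddAll_saturated (xs : List Int) (topk : Int) (seen : PySem.Set Int)
    (expanded : List Int) (h : (expanded.length : Int) ≥ topk) :
    pvAddAll xs topk seen expanded = (seen, expanded) := by
  induction xs with
  | nil => rfl
  | cons x rest ih => simp [pvAddAll, if_pos h, ih]

theorem pvInnerLoop_eq (links : List Int) (topk : Int) (seen : PySem.Set Int)
    (expanded : List Int) :
    pvInnerLoop links topk seen expanded = pvAddAll links topk seen expanded := by
  induction links generalizing seen expanded with
  | nil => rfl
  | cons x rest ih =>
    simp only [pvInnerLoop, pvAddAll]
    by_cases h : (expanded.length : Int) ≥ topk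
    · rw [if_pos h, if_pos h, pvAddAll_saturated _ _ _ _ h]
    · rw [if_neg h, if_neg h]
      by_cases hc : PySem.Set.contains seen x
      · rw [if_pos hc, if_pos hc, ih]
      · rw [if_neg hc, if_neg hc, ih]

theorem pvAddAll_append (xs ys : List Int) (topk : Int) (seen : PySem.Set Int)
    (expanded : List Int) :
    pvAddAll (xs ++ ys) topk seen expanded =
      pvAddAll ys topk (pvAddAll xs topk seen expanded).1 (pvAddAll xs topk seen expanded).2 := by
  induction xs generalizing seen expanded with
  | nil => rfl
  | cons x rest ih =>
    simp only [List.cons_append, pvAddAll]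
    by_cases h : (expanded.length : Int) ≥ topk
    · rw [if_pos h, if_pos h, ih]
    · rw [if_neg h, if_neg h]
      by_cases hc : PySem.Set.contains seen x
      · rw [if_pos hc, if_pos hc, ih]
      · rw [if_neg hc, if_neg hc, ih]

def pvFlatOf (ids : List Int) (link_dict : List (Int × List Int)) : List Int :=
  ids.flatMap (fun did => did :: (PySem.Dict.mk link_dict).getD did [])

theorem pvOuterLoop_eq (ids : List Int) (link_dict : List (Int × List Int)) (topk : Int)
    (seen : PySem.Set Int) (expanded : List Int) :
    pvOuterLoop ids link_dict topk seen expanded =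
      pvAddAll (pvFlatOf ids link_dict) topk seen expanded := by
  induction ids generalizing seen expanded with
  | nil => rfl
  | cons did rest ih =>
    have hflat : pvFlatOf (did :: rest) link_dict =
        did :: ((PySem.Dict.mk link_dict).getD did [] ++ pvFlatOf rest link_dict) := by
      simp [pvFlatOf]
    rw [hflat]
    simp only [pvOuterLoop, pvAddAll]
    by_cases h : (expanded.length : Int) ≥ topk
    · rw [if_pos h, if_pos h, pvAddAll_saturated _ _ _ _ h]
    · rw [if_neg h, if_neg h]
      by_cases hc : did ∈ seen
      · simp [pvInnerLoop_eq, ih, pvAddAll_append, hc]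
      · simp [pvInnerLoop_eq, ih, pvAddAll_append, hc]

theorem pvAddAll_spec (xs : List Int) (topk : Int) (seen : PySem.Set Int)
    (expanded : List Int) (hinv : ∀ y, y ∈ seen ↔ y ∈ expanded) :
    (pvAddAll xs topk seen expanded).2 =
      expanded ++ (pvDNew expanded xs).take (topk.toNat - expanded.length) := by
  induction xs generalizing seen expanded with
  | nil => simp [pvAddAll, pvDNew]
  | cons x rest ih =>
    simp only [pvAddAll]
    by_cases h : (expanded.length : Int) ≥ topk
    · rw [if_pos h, ih seen expanded hinv]
      have hz : topk.toNat - expanded.length = 0 := by omega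
      rw [hz]
      simp only [pvDNew]
      split <;> simp
    · rw [if_neg h]
      have hlt : expanded.length < topk.toNat := by omega
      by_cases hx : x ∈ expanded
      · have hc : PySem.Set.contains seen x = true := by
          simp [PySem.Set.contains, (hinv x).mpr hx]
        rw [if_pos hc, ih seen expanded hinv]
        simp [pvDNew, hx]
      · have hc : ¬ PySem.Set.contains seen x = true := by
          simp only [PySem.Set.contains, List.contains_eq_mem, decide_eq_true_eq]
          exact fun hm => hx ((hinv x).mp hm)
        rw [if_neg hc]
        have hinv' : ∀ y, y ∈ PySem.Set.add seen x ↔ y ∈ expanded ++ [x] := by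
          intro y
          rw [PySem.Set.mem_add]
          simp [hinv y]
        rw [ih _ _ hinv']
        have hd : pvDNew (expanded ++ [x]) rest = pvDNew (x :: expanded) rest :=
          pvDNew_congr _ _ _ (fun y => by simp [or_comm])
        simp only [pvDNew, if_neg hx, hd]
        have hk : topk.toNat - expanded.length = (topk.toNat - (expanded ++ [x]).length) + 1 := by
          simp only [List.length_append, List.length_cons, List.length_nil]
          omega
        rw [hk, List.take_succ_cons]
        simp

theorem pvFoldl_flat_eq (ids : List Int) (link_dict : List (Int × List Int)) (acc : List Int) :
    ids.foldl (fun acc did => acc ++ [did] ++ (PySem.Dict.mk link_dict).getD did []) acc =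
      acc ++ pvFlatOf ids link_dict := by
  induction ids generalizing acc with
  | nil => simp [pvFlatOf]
  | cons did rest ih => simp [pvFlatOf, List.flatMap, List.foldl_cons]

theorem pvDedup_eq_dNew (xs : List Int) :
    PySem.List.dedup xs = pvDNew [] xs := by
  rw [PySem.List.dedup_eq_ofList, PySem.Set.ofList_eq_foldl]
  suffices h : ∀ (acc : PySem.Set Int), xs.foldl PySem.Set.add acc = acc ++ pvDNew acc xs from
    h []
  induction xs with
  | nil => intro acc; simp [pvDNew]
  | cons x rest ih =>
    intro acc
    simp only [List.foldl_cons, pvDNew]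
    by_cases hx : x ∈ acc
    · rw [if_pos hx]
      have ha : PySem.Set.add acc x = acc := by
        simp [PySem.Set.add, PySem.Set.contains, hx]
      rw [ha, ih]
    · rw [if_neg hx]
      have ha : PySem.Set.add acc x = acc ++ [x] := by
        simp [PySem.Set.add, PySem.Set.contains, hx]
      rw [ha, ih]
      rw [pvDNew_congr (acc ++ [x]) (x :: acc) rest (fun y => by simp [or_comm])]
      simp

-- ===== VERDICT (by name: the statement is the Claim_ definition above) =====
theorem expand_with_links_spec : Claim_equal_expand_with_links := by
  intro ids ld topk _
  unfold Spec_expand_with_links expand_with_links expand_with_links_alt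
  simp only [pvOuterLoop_eq, pvFoldl_flat_eq]
  rw [pvAddAll_spec _ _ _ _ (by intro y; simp [PySem.Set.empty]), pvDedup_eq_dNew]
  have hmax : (max topk 0) = ((topk.toNat : Nat) : Int) := by omega
  rw [hmax, PySem.List.slice_to_natCast]
  simp
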